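-- pv_equiv track=rewrite | github.com/CornerMercury/AOC | day15/solve.py | part1
-- ===== SOURCE A (Python) =====
-- def part1(data):
--     l = data.strip("\n").split(",")
--     res = 0
--     for part in l:
--         cur = 0
--         for c in part:
--             cur += ord(c)
--             cur *= 17
--             cur %= 256
--         res += cur
--
--     return res
-- ===== SOURCE B (Python) =====
-- def part1(data):
--     res = 0
--     cur = 0
--     for c in data.strip("\n"):
--         if c == ',':
--             res += cur
--             cur = 0
--         else:
--             cur = (cur + ord(c)) * 17 % 256
--     return res + cur
-- ===== Notes on version B (the rewrite author's own statement) =====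
-- stated objective: simpler
-- what changed: Single character pass with two accumulators (running hash, running sum) that flushes the running hash into the sum at each separator, replacing the split into a token list and the nested per-token loop.
import Mathlib
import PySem

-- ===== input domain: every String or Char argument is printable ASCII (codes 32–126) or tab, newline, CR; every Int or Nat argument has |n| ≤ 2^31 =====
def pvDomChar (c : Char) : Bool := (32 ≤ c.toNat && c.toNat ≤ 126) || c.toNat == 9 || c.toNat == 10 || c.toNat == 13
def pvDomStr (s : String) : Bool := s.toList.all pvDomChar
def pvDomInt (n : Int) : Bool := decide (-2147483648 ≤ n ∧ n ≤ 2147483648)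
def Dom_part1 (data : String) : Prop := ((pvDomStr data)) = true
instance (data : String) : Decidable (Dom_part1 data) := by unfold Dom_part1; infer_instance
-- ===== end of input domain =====

-- B replaces split-then-hash-each-token by one character pass with a flush on ',' (simpler; no intermediate list).

-- ===== PORT A =====
def part1 (data : String) : Int :=
  let l := PySem.Chars.splitOn (PySem.Chars.stripChars data.toList ['\n']) [',']
  l.foldl (fun res part =>
    res + part.foldl (fun cur c => PySem.Int.mod ((cur + (c.toNat : Int)) * 17) 256) 0) 0

-- ===== PORT B =====
def part1_alt (data : String) : Int :=
  let p := (PySem.Chars.stripChars data.toList ['\n']).foldl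
    (fun (p : Int × Int) c =>
      if c = ',' then (p.1 + p.2, 0)
      else (p.1, PySem.Int.mod ((p.2 + (c.toNat : Int)) * 17) 256)) (0, 0)
  p.1 + p.2

-- ===== PRECONDITION & SPEC =====
def Spec_part1 (data : String) (out : Int) : Prop := out = part1_alt data
instance (data : String) (out : Int) : Decidable (Spec_part1 data out) := by unfold Spec_part1; infer_instance

-- ===== CLAIM (what is proved, stated in full; the proofs are below) =====
def Claim_equal_part1 : Prop := ∀ (data : String), Dom_part1 data → Spec_part1 data (part1 data)

-- ===== LEMMAS AND PROOFS =====

-- per-character hash step shared by both Pythons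
def pvH (cur : Int) (c : Char) : Int := PySem.Int.mod ((cur + (c.toNat : Int)) * 17) 256

def pvHash (cur : Int) (cs : List Char) : Int := cs.foldl pvH cur

-- split on ',' as (first piece, remaining pieces)
def pvSC : List Char → List Char × List (List Char)
  | [] => ([], [])
  | c :: cs =>
    let r := pvSC cs
    if c = ',' then ([], r.1 :: r.2) else (c :: r.1, r.2)

lemma pvGo_spec (fuel : Nat) : ∀ (l cur : List Char) (acc : List (List Char)), l.length < fuel →
    PySem.Chars.splitOn.go [','] fuel l cur acc
      = acc.reverse ++ ((cur.reverse ++ (pvSC l).1) :: ((pvSC l).2).map id) := by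
  induction fuel with
  | zero => intro l cur acc h; omega
  | succ n ih =>
    intro l cur acc h
    cases l with
    | nil => simp [PySem.Chars.splitOn.go, pvSC]
    | cons c rest =>
      by_cases hc : c = ','
      · subst hc
        have : PySem.Chars.splitOn.go [','] (n+1) (',' :: rest) cur acc
            = PySem.Chars.splitOn.go [','] n rest [] (cur.reverse :: acc) := by
          simp [PySem.Chars.splitOn.go, List.isPrefixOf]
        rw [this, ih rest [] (cur.reverse :: acc) (by simpa using Nat.lt_of_succ_lt_succ h)]
        simp [pvSC]
      · have : PySem.Chars.splitOn.go [','] (n+1) (c :: rest) cur acc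
            = PySem.Chars.splitOn.go [','] n rest (c :: cur) acc := by
          simp [PySem.Chars.splitOn.go, List.isPrefixOf, Ne.symm hc]
        rw [this, ih rest (c :: cur) acc (by simpa using Nat.lt_of_succ_lt_succ h)]
        simp [pvSC, hc]

lemma pvSplitOn_comma (s : List Char) :
    PySem.Chars.splitOn s [','] = (pvSC s).1 :: (pvSC s).2 := by
  have := pvGo_spec (s.length + 1) s [] [] (by omega)
  simpa [PySem.Chars.splitOn] using this

lemma pvFoldA (l : List (List Char)) : ∀ (a : Int),
    l.foldl (fun res part => res + part.foldl pvH 0) a = a + (l.map (pvHash 0)).sum := by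
  induction l with
  | nil => intro a; simp
  | cons p ps ih => intro a; simp [List.foldl_cons, ih, pvHash]; ring

lemma pvFoldB (cs : List Char) : ∀ (res cur : Int),
    (cs.foldl (fun (p : Int × Int) c =>
        if c = ',' then (p.1 + p.2, 0) else (p.1, pvH p.2 c)) (res, cur)).1
      + (cs.foldl (fun (p : Int × Int) c =>
        if c = ',' then (p.1 + p.2, 0) else (p.1, pvH p.2 c)) (res, cur)).2
      = res + pvHash cur (pvSC cs).1 + (((pvSC cs).2).map (pvHash 0)).sum := by
  induction cs with
  | nil => intro res cur; simp [pvSC, pvHash]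
  | cons c cs ih =>
    intro res cur
    by_cases hc : c = ','
    · subst hc
      simp only [List.foldl_cons, pvSC]
      rw [ih]
      simp [pvHash]; ring
    · simp only [List.foldl_cons, if_neg hc, pvSC]
      rw [ih]
      simp [pvHash, List.foldl_cons]

-- ===== VERDICT (by name: the statement is the Claim_ definition above) =====
theorem part1_spec : Claim_equal_part1 := by
  intro data _
  unfold Spec_part1 part1 part1_alt
  set s := PySem.Chars.stripChars data.toList ['\n'] with hs
  rw [pvSplitOn_comma]
  rw [show (fun cur (c : Char) => PySem.Int.mod ((cur + (c.toNat : Int)) * 17) 256) = pvH from rfl]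
  rw [show (fun (p : Int × Int) (c : Char) =>
        if c = ',' then (p.1 + p.2, 0) else (p.1, PySem.Int.mod ((p.2 + (c.toNat : Int)) * 17) 256))
      = (fun (p : Int × Int) c => if c = ',' then (p.1 + p.2, 0) else (p.1, pvH p.2 c)) from rfl]
  rw [pvFoldA, pvFoldB]
  simp [pvHash]
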